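-- pv_equiv track=rewrite | github.com/xthhua96/luckydog | ssp_simulate.py | count_all_prizes
-- ===== SOURCE A (Python) =====
-- def check_prize(winning_ticket, ticket):
--     red_win, blue_win = winning_ticket[:6], winning_ticket[6]
--     red, blue = ticket[:6], ticket[6]
--     red_hit = len(set(red) & set(red_win))
--     blue_hit = (blue == blue_win)
--
--     if red_hit == 6 and blue_hit:
--         return "First"
--     elif red_hit == 6 and not blue_hit:
--         return "Second"
--     elif red_hit == 5 and blue_hit:
--         return "Third"
--     elif red_hit == 5 or (red_hit == 4 and blue_hit):
--         return "Fourth"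
--     elif red_hit == 4 or (red_hit == 3 and blue_hit):
--         return "Fifth"
--     elif blue_hit:
--         return "Sixth"
--     else:
--         return None
--
-- def count_all_prizes(counter, winning_ticket):
--     prizes = {
--         "First": 0,
--         "Second": 0,
--         "Third": 0,
--         "Fourth": 0,
--         "Fifth": 0,
--         "Sixth": 0
--     }
--     for ticket, count in counter.items():
--         res = check_prize(winning_ticket, ticket)
--         if res in prizes:
--             prizes[res] += count
--     return prizes
-- ===== SOURCE B (Python) =====
-- _TIERS = [
--     ("First",  lambda r, b: r == 6 and b),
--     ("Second", lambda r, b: r == 6 and not b),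
--     ("Third",  lambda r, b: r == 5 and b),
--     ("Fourth", lambda r, b: (r == 5 and not b) or (r == 4 and b)),
--     ("Fifth",  lambda r, b: (r == 4 and not b) or (r == 3 and b)),
--     ("Sixth",  lambda r, b: r <= 2 and b),
-- ]
--
-- def count_all_prizes(counter, winning_ticket):
--     hits = [(len(set(t[:6]) & set(winning_ticket[:6])), t[6] == winning_ticket[6], c)
--             for t, c in counter.items()]
--     return {name: sum(c for r, b, c in hits if pred(r, b)) for name, pred in _TIERS}
-- ===== Notes on version B (the rewrite author's own statement) =====
-- stated objective: alternative
-- what changed: A classifies each ticket with an if/elif cascade and accumulates into a mutable prize dict in one pass; B works in two stages with no classifier at all: it first maps the counter to a list of (red_hit, blue_hit, count) triples, then builds the result dict by computing each tier's total as an independent filtered sum over that list using one predicate per tier.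
import Mathlib
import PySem

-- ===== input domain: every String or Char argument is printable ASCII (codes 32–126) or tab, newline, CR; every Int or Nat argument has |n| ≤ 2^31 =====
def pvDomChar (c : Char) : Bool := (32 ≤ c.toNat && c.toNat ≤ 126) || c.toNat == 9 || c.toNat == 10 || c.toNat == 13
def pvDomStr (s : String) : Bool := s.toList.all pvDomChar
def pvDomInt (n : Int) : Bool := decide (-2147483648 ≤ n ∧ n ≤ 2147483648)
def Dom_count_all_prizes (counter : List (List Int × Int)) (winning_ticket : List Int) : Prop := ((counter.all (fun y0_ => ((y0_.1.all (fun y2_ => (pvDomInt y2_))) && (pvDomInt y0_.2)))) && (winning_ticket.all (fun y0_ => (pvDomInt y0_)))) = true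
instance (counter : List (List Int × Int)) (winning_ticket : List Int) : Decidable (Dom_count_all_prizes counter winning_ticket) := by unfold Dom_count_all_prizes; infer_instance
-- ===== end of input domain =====

-- B replaces A's one-pass if/elif classifier + mutable prize dict with two stages: a list of
-- (red_hit, blue_hit, count) triples built first, then one independent filtered sum per tier.

-- ===== PORT A =====
-- check_prize: the [6] indexing is ported with pyGetD (default 0); it is exact under
-- Pre_count_all_prizes, which guarantees the index is in range (Python raises otherwise).
def check_prize (winning_ticket ticket : List Int) : Option String :=
  let red_win := PySem.List.slice winning_ticket none (some 6)
  let blue_win := PySem.List.pyGetD winning_ticket 6 0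
  let red := PySem.List.slice ticket none (some 6)
  let blue := PySem.List.pyGetD ticket 6 0
  let red_hit : Int := PySem.Set.len (PySem.Set.inter (PySem.Set.ofList red) (PySem.Set.ofList red_win))
  let blue_hit : Bool := blue == blue_win
  if red_hit == 6 && blue_hit then some "First"
  else if red_hit == 6 && !blue_hit then some "Second"
  else if red_hit == 5 && blue_hit then some "Third"
  else if red_hit == 5 || (red_hit == 4 && blue_hit) then some "Fourth"
  else if red_hit == 4 || (red_hit == 3 && blue_hit) then some "Fifth"
  else if blue_hit then some "Sixth"
  else none

def count_all_prizes (counter : List (List Int × Int)) (winning_ticket : List Int) : List (String × Int) :=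
  let prizes0 : PySem.Dict String Int :=
    (((((PySem.Dict.empty.insert "First" 0).insert "Second" 0).insert "Third" 0).insert
        "Fourth" 0).insert "Fifth" 0).insert "Sixth" 0
  (counter.foldl (fun prizes tc =>
      match check_prize winning_ticket tc.1 with
      | some res => if prizes.contains res then prizes.modify res 0 (fun v => v + tc.2) else prizes
      | none => prizes) prizes0).items

-- ===== PORT B =====
-- _TIERS: the six tier names with their (red_hit, blue_hit) predicates
def tierPreds : List (String × (Int → Bool → Bool)) :=
  [("First",  fun r b => r == 6 && b),
   ("Second", fun r b => r == 6 && !b),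
   ("Third",  fun r b => r == 5 && b),
   ("Fourth", fun r b => (r == 5 && !b) || (r == 4 && b)),
   ("Fifth",  fun r b => (r == 4 && !b) || (r == 3 && b)),
   ("Sixth",  fun r b => r ≤ 2 && b)]

-- one element of B's `hits` list: (red_hit, blue_hit, count); the [6] indexing is pyGetD
-- (default 0), exact under Pre_.
def hitOf (winning_ticket : List Int) (tc : List Int × Int) : Int × Bool × Int :=
  (PySem.Set.len (PySem.Set.inter (PySem.Set.ofList (PySem.List.slice tc.1 none (some 6)))
      (PySem.Set.ofList (PySem.List.slice winning_ticket none (some 6)))),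
   PySem.List.pyGetD tc.1 6 0 == PySem.List.pyGetD winning_ticket 6 0, tc.2)

-- sum(c for r, b, c in hits if pred(r, b))
def tally (hits : List (Int × Bool × Int)) (p : Int → Bool → Bool) : Int :=
  ((hits.filter (fun x => p x.1 x.2.1)).map (fun x => x.2.2)).sum

def count_all_prizes_alt (counter : List (List Int × Int)) (winning_ticket : List Int) : List (String × Int) :=
  let hits := counter.map (hitOf winning_ticket)
  tierPreds.map (fun np => (np.1, tally hits np.2))

-- ===== PRECONDITION & SPEC =====
-- Pre_ excludes exactly the inputs where Python A raises IndexError: a non-empty counter with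
-- winning_ticket, or some ticket, shorter than 7 (B raises there too).
def Pre_count_all_prizes (counter : List (List Int × Int)) (winning_ticket : List Int) : Prop :=
  (counter = [] ∨ 7 ≤ winning_ticket.length) ∧ (∀ p ∈ counter, 7 ≤ p.1.length)

instance (counter : List (List Int × Int)) (winning_ticket : List Int) : Decidable (Pre_count_all_prizes counter winning_ticket) := by
  unfold Pre_count_all_prizes; infer_instance

def pvWitness_count_all_prizes : (List (List Int × Int)) × List Int :=
  ([([1, 2, 3, 4, 5, 6, 7], 2), ([1, 2, 3, 9, 10, 11, 7], 1)], [1, 2, 3, 4, 5, 6, 7])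

def Spec_count_all_prizes (counter : List (List Int × Int)) (winning_ticket : List Int) (out : List (String × Int)) : Prop := out = count_all_prizes_alt counter winning_ticket
instance (counter : List (List Int × Int)) (winning_ticket : List Int) (out : List (String × Int)) : Decidable (Spec_count_all_prizes counter winning_ticket out) := by unfold Spec_count_all_prizes; infer_instance

-- ===== CLAIM (what is proved, stated in full; the proofs are below) =====
def Claim_equal_count_all_prizes : Prop := ∀ (counter : List (List Int × Int)) (winning_ticket : List Int), Dom_count_all_prizes counter winning_ticket → Pre_count_all_prizes counter winning_ticket → Spec_count_all_prizes counter winning_ticket (count_all_prizes counter winning_ticket)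

-- ===== LEMMAS AND PROOFS =====

-- A's if/elif cascade as a function of (red_hit, blue_hit); check_prize is exactly this
def cascade (r : Int) (b : Bool) : Option String :=
  if r == 6 && b then some "First"
  else if r == 6 && !b then some "Second"
  else if r == 5 && b then some "Third"
  else if r == 5 || (r == 4 && b) then some "Fourth"
  else if r == 4 || (r == 3 && b) then some "Fifth"
  else if b then some "Sixth"
  else none

lemma check_prize_eq_cascade (wt t : List Int) :
    check_prize wt t = cascade (hitOf wt (t, 0)).1 (hitOf wt (t, 0)).2.1 := rfl

-- red_hit is the size of an intersection of two ≤6-element sets, hence between 0 and 6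
lemma redHit_bounds (wt t : List Int) :
    0 ≤ (hitOf wt (t, 0)).1 ∧ (hitOf wt (t, 0)).1 ≤ 6 := by
  have hsub : PySem.Set.inter (PySem.Set.ofList (PySem.List.slice t none (some 6)))
      (PySem.Set.ofList (PySem.List.slice wt none (some 6))) ⊆
      PySem.Set.ofList (PySem.List.slice t none (some 6)) := by
    intro y hy
    exact ((PySem.Set.mem_inter _ _ _).1 hy).1
  have hnd : (PySem.Set.inter (PySem.Set.ofList (PySem.List.slice t none (some 6)))
      (PySem.Set.ofList (PySem.List.slice wt none (some 6)))).Nodup :=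
    PySem.Set.nodup_inter _ _ (PySem.Set.nodup_ofList _)
  have hlen1 : (PySem.Set.inter (PySem.Set.ofList (PySem.List.slice t none (some 6)))
      (PySem.Set.ofList (PySem.List.slice wt none (some 6)))).length ≤
      (PySem.Set.ofList (PySem.List.slice t none (some 6))).length :=
    (hnd.subperm hsub).length_le
  have hlen2 : (PySem.Set.ofList (PySem.List.slice t none (some 6))).length ≤
      (PySem.List.slice t none (some 6)).length := PySem.Set.length_ofList_le _
  have hlen3 : (PySem.List.slice t none (some 6)).length ≤ 6 := by
    rw [PySem.List.slice_to t (by norm_num)]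
    simp
  constructor
  · simp [hitOf, PySem.Set.len]
  · simp only [hitOf, PySem.Set.len]
    omega

-- master invariant: A's fold over l, started from any six accumulators, produces exactly
-- the six per-tier predicate sums of B's hits list added to those accumulators
lemma master (wt : List Int) (l : List (List Int × Int)) (a1 a2 a3 a4 a5 a6 : Int) :
    (l.foldl (fun prizes tc =>
        match check_prize wt tc.1 with
        | some res => if prizes.contains res then prizes.modify res 0 (fun v => v + tc.2) else prizes
        | none => prizes)
      (PySem.Dict.mk [("First", a1), ("Second", a2), ("Third", a3), ("Fourth", a4), ("Fifth", a5), ("Sixth", a6)])).items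
    = [("First",  a1 + tally (l.map (hitOf wt)) (fun r b => r == 6 && b)),
       ("Second", a2 + tally (l.map (hitOf wt)) (fun r b => r == 6 && !b)),
       ("Third",  a3 + tally (l.map (hitOf wt)) (fun r b => r == 5 && b)),
       ("Fourth", a4 + tally (l.map (hitOf wt)) (fun r b => (r == 5 && !b) || (r == 4 && b))),
       ("Fifth",  a5 + tally (l.map (hitOf wt)) (fun r b => (r == 4 && !b) || (r == 3 && b))),
       ("Sixth",  a6 + tally (l.map (hitOf wt)) (fun r b => r ≤ 2 && b))] := by
  induction l generalizing a1 a2 a3 a4 a5 a6 with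
  | nil => simp [tally]
  | cons tc xs ih =>
    obtain ⟨h0, h6⟩ := redHit_bounds wt tc.1
    have hcp : check_prize wt tc.1 = cascade (hitOf wt (tc.1, 0)).1 (hitOf wt (tc.1, 0)).2.1 :=
      check_prize_eq_cascade wt tc.1
    have hhit : hitOf wt tc = ((hitOf wt (tc.1, 0)).1, (hitOf wt (tc.1, 0)).2.1, tc.2) := by
      simp [hitOf]
    simp only [List.foldl_cons, List.map_cons, hcp, hhit]
    generalize (hitOf wt (tc.1, 0)).1 = r at h0 h6
    generalize (hitOf wt (tc.1, 0)).2.1 = b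
    interval_cases r <;> cases b <;>
      · simp [cascade, tally, PySem.Dict.contains, PySem.Dict.modify, PySem.Dict.insert,
          PySem.Dict.getD, PySem.Dict.get?] at ih ⊢
        try rw [ih]
        try simp [add_assoc]

-- ===== VERDICT (by name: the statement is the Claim_ definition above) =====
theorem count_all_prizes_spec : Claim_equal_count_all_prizes := by
  intro counter winning_ticket _ _
  unfold Spec_count_all_prizes count_all_prizes count_all_prizes_alt
  dsimp only
  have hinit : ((((((PySem.Dict.empty.insert "First" 0).insert "Second" 0).insert "Third" 0).insert
      "Fourth" 0).insert "Fifth" 0).insert "Sixth" 0 : PySem.Dict String Int) =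
      PySem.Dict.mk [("First", 0), ("Second", 0), ("Third", 0), ("Fourth", 0), ("Fifth", 0), ("Sixth", 0)] := by
    decide
  rw [hinit, master]
  simp [tierPreds]
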